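-- pv_equiv track=rewrite | github.com/astrapi69/write-book-template | scripts/print_version_build.py | _split_valid_invalid_options
-- ===== SOURCE A (Python) =====
-- from typing import Iterable, List, Tuple
--
-- def _split_valid_invalid_options(extra: List[str], allowed: set[str]) -> tuple[list[str], list[str]]:
--     """
--     Split passthrough args into (valid, invalid) based on *option names* only.
--     Handles both '--opt=value' and '--opt value' forms. Non-option tokens are ignored.
--     """
--     valid: list[str] = []
--     invalid: list[str] = []
--
--     i = 0
--     while i < len(extra):
--         tok = extra[i]
--         if tok.startswith("--"):
--             name = tok.split("=", 1)[0]
--             bucket = valid if name in allowed else invalid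
--             bucket.append(tok)
--             # If value is in next token (e.g., --opt value) keep it with the same bucket
--             if "=" not in tok and (i + 1) < len(extra) and not extra[i + 1].startswith("-"):
--                 bucket.append(extra[i + 1])
--                 i += 1
--         # Bare tokens (positional) are ignored for this pipeline
--         i += 1
--     return valid, invalid
-- ===== SOURCE B (Python) =====
-- def _split_valid_invalid_options(extra, allowed):
--     # Pass 1: group option tokens with their attached value token; skip bare tokens.
--     # (stack holds the remaining tokens in reverse, so stack[-1]/pop() is the next token)
--     groups = []
--     stack = list(reversed(extra))
--     while stack:
--         tok = stack.pop()
--         if not tok.startswith("--"):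
--             continue
--         if "=" not in tok and stack and not stack[-1].startswith("-"):
--             groups.append([tok, stack.pop()])
--         else:
--             groups.append([tok])
--     # Pass 2: classify each group by its option name.
--     valid, invalid = [], []
--     for g in groups:
--         name = g[0].split("=", 1)[0]
--         (valid if name in allowed else invalid).extend(g)
--     return valid, invalid
-- ===== Notes on version B (the rewrite author's own statement) =====
-- stated objective: alternative
-- what changed: B separates the work into two passes: first it parses the token list into option groups (option token plus its attached value token), then it classifies each whole group into the valid/invalid bucket; A interleaves bucket selection with index-lookahead in one while loop.
import Mathlib
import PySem

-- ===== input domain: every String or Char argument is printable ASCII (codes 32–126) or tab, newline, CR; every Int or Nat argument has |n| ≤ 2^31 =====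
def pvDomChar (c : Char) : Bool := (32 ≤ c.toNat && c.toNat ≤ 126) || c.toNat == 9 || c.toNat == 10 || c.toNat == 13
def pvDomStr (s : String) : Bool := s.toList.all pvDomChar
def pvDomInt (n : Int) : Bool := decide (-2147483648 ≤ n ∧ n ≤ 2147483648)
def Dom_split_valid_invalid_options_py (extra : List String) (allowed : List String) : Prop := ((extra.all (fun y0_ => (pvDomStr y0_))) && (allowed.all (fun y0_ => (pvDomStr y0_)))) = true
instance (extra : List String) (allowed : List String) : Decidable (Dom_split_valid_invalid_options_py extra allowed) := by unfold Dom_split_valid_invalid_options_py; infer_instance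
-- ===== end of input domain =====

-- B parses the tokens into option groups first and classifies whole groups second,
-- instead of A's single while loop with index lookahead: an alternative decomposition, not faster.

-- ===== PORT A =====
-- tok.split("=", 1)[0]  (same expression in both Pythons)
def pvName (tok : String) : String := ((PySem.Str.splitMax? tok "=" 1).getD []).headD ""

-- A's while loop over index i, transcribed as recursion on the remaining tokens
-- (i advances by 1, or by 2 when the next token is consumed as a value);
-- valid/invalid are the two accumulators, bucket choice interleaved as in A.
def pvLoopA (allowed : List String) : List String → List String → List String → List String × List String
  | [], valid, invalid => (valid, invalid)
  | [tok], valid, invalid =>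
    if PySem.Str.startswith tok "--" = true then
      -- lookahead condition is false: no next token
      if allowed.contains (pvName tok) then (valid ++ [tok], invalid) else (valid, invalid ++ [tok])
    else (valid, invalid)
  | tok :: next :: rest', valid, invalid =>
    if PySem.Str.startswith tok "--" = true then
      if allowed.contains (pvName tok) then
        if PySem.Str.isIn "=" tok = false ∧ PySem.Str.startswith next "-" = false then
          pvLoopA allowed rest' (valid ++ [tok, next]) invalid
        else
          pvLoopA allowed (next :: rest') (valid ++ [tok]) invalid
      else
        if PySem.Str.isIn "=" tok = false ∧ PySem.Str.startswith next "-" = false then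
          pvLoopA allowed rest' valid (invalid ++ [tok, next])
        else
          pvLoopA allowed (next :: rest') valid (invalid ++ [tok])
    else pvLoopA allowed (next :: rest') valid invalid

def split_valid_invalid_options_py (extra : List String) (allowed : List String) : List String × List String :=
  pvLoopA allowed extra [] []

-- ===== PORT B =====
-- pass 1: groups of [option] or [option, value]; bare tokens skipped
def pvGroups : List String → List (List String)
  | [] => []
  | [tok] => if PySem.Str.startswith tok "--" = true then [[tok]] else []
  | tok :: next :: rest' =>
    if PySem.Str.startswith tok "--" = true then
      if PySem.Str.isIn "=" tok = false ∧ PySem.Str.startswith next "-" = false then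
        [tok, next] :: pvGroups rest'
      else
        [tok] :: pvGroups (next :: rest')
    else pvGroups (next :: rest')

-- pass 2: extend the bucket chosen by the group's option name
def pvStep (allowed : List String) (acc : List String × List String) (g : List String) : List String × List String :=
  if allowed.contains (pvName (g.headD "")) then (acc.1 ++ g, acc.2) else (acc.1, acc.2 ++ g)

def split_valid_invalid_options_py_alt (extra : List String) (allowed : List String) : List String × List String :=
  (pvGroups extra).foldl (pvStep allowed) ([], [])

-- ===== PRECONDITION & SPEC =====
def Spec_split_valid_invalid_options_py (extra : List String) (allowed : List String) (out : List String × List String) : Prop := out = split_valid_invalid_options_py_alt extra allowed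
instance (extra : List String) (allowed : List String) (out : List String × List String) : Decidable (Spec_split_valid_invalid_options_py extra allowed out) := by unfold Spec_split_valid_invalid_options_py; infer_instance

-- ===== CLAIM (what is proved, stated in full; the proofs are below) =====
def Claim_equal_split_valid_invalid_options_py : Prop := ∀ (extra : List String) (allowed : List String), Dom_split_valid_invalid_options_py extra allowed → Spec_split_valid_invalid_options_py extra allowed (split_valid_invalid_options_py extra allowed)

-- ===== LEMMAS AND PROOFS =====
-- loop invariant: A's loop from any accumulator pair equals B's classification fold
-- over the groups of the remaining tokens, started from that pair
lemma pvLoopA_eq_foldl (allowed : List String) :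
    ∀ (xs valid invalid : List String),
      pvLoopA allowed xs valid invalid = (pvGroups xs).foldl (pvStep allowed) (valid, invalid) := by
  intro xs
  induction xs using pvGroups.induct with
  | case1 =>
    intro v iv; simp [pvLoopA, pvGroups]
  | case2 tok h1 =>
    intro v iv
    by_cases hv : allowed.contains (pvName tok) = true <;>
      simp_all [pvLoopA, pvGroups, pvStep]
  | case3 tok h1 =>
    intro v iv; simp_all [pvLoopA, pvGroups]
  | case4 tok next rest' h1 h2 ih =>
    intro v iv
    by_cases hv : allowed.contains (pvName tok) = true <;>
      simp_all [pvLoopA, pvGroups, pvStep]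
  | case5 tok next rest' h1 h2 ih =>
    intro v iv
    have hC : ¬ (PySem.Chars.isIn ['='] tok.toList = false ∧
        PySem.Chars.startswith next.toList ['-'] = false) := by simpa using h2
    by_cases hv : allowed.contains (pvName tok) = true <;>
      simp_all [pvLoopA, pvGroups, pvStep, if_neg hC]
  | case6 tok next rest' h1 ih =>
    intro v iv; simp_all [pvLoopA, pvGroups]

-- ===== VERDICT (by name: the statement is the Claim_ definition above) =====
theorem split_valid_invalid_options_py_spec : Claim_equal_split_valid_invalid_options_py := by
  intro extra allowed _
  unfold Spec_split_valid_invalid_options_py split_valid_invalid_options_py split_valid_invalid_options_py_alt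
  exact pvLoopA_eq_foldl allowed extra [] []
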